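-- pv_equiv track=rewrite | github.com/JairGF05/identificador_relaciones | functions.py | cotas_inferiores
-- ===== SOURCE A (Python) =====
-- def cotas_inferiores(poset,conjunto):
--     ci = []
--     for number in poset:
--         isCotaInferior = True
--         for element in conjunto:
--             if (number < element):
--                 if (element % number != 0):
--                     isCotaInferior = False
--             else:
--                 isCotaInferior = False
--         if (isCotaInferior):
--             ci.append(number)
--             isCotaInferior = True
--     return ci
-- ===== SOURCE B (Python) =====
-- def _gcd(a, b):
--     a = abs(a)
--     b = abs(b)
--     while b:
--         a, b = b, a % b
--     return a
--
-- def cotas_inferiores(poset, conjunto):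
--     if not conjunto:
--         return list(poset)
--     m = conjunto[0]
--     g = 0
--     for e in conjunto:
--         if e < m:
--             m = e
--         g = _gcd(g, e)
--     return [n for n in poset if n != 0 and n < m and g % n == 0]
-- ===== Notes on version B (the rewrite author's own statement) =====
-- stated objective: faster
-- what changed: Instead of re-scanning conjunto for every poset element, B precomputes min(conjunto) and gcd(conjunto) in one pass, then filters poset by n < min and n | gcd in a single pass.
import Mathlib
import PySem

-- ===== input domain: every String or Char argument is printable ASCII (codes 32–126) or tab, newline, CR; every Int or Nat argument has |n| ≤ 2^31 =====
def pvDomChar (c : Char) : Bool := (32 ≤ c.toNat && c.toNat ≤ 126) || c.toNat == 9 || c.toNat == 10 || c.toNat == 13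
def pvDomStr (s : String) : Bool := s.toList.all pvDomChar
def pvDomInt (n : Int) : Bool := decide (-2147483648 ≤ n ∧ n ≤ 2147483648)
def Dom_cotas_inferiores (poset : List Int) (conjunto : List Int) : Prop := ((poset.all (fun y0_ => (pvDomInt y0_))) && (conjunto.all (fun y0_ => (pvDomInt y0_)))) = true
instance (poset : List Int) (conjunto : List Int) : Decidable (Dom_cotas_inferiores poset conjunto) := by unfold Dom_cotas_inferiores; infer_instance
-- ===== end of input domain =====

-- B precomputes min(conjunto) and gcd(conjunto) once, then filters poset in a single pass (asymptotically faster than A's nested scan).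


-- ===== PORT A =====
-- literal transliteration: outer loop appends, inner loop maintains isCotaInferior
def cotas_inferiores (poset : List Int) (conjunto : List Int) : List Int :=
  poset.foldl (fun ci number =>
    let isCotaInferior := conjunto.foldl (fun b element =>
      if number < element then
        (if PySem.Int.mod element number ≠ 0 then false else b)
      else false) true
    if isCotaInferior then ci ++ [number] else ci) []

-- ===== PORT B =====
-- port of Source B's hand-written Euclid `while b: a, b = b, a % b` on absolute values;
-- fuel = the second argument bounds the iteration count (a % (b+1) ≤ b), keeping the
-- recursion structural so the kernel can evaluate it.
def pvEuclidAux : Nat → Nat → Nat → Nat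
  | _, a, 0 => a
  | 0, a, _ + 1 => a
  | fuel + 1, a, b + 1 => pvEuclidAux fuel (b + 1) (a % (b + 1))

def pvGcd (a b : Int) : Int := (pvEuclidAux b.natAbs a.natAbs b.natAbs : Nat)

def cotas_inferiores_alt (poset : List Int) (conjunto : List Int) : List Int :=
  match conjunto with
  | [] => poset
  | c :: _ =>
    let mg := conjunto.foldl (fun (p : Int × Int) e =>
      ((if e < p.1 then e else p.1), pvGcd p.2 e)) (c, 0)
    poset.filter (fun n => n ≠ 0 && n < mg.1 && PySem.Int.mod mg.2 n = 0)

-- ===== PRECONDITION & SPEC =====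
-- Pre_ excludes exactly the inputs where A raises ZeroDivisionError: 0 in poset together
-- with a positive element of conjunto (the inner loop then evaluates element % 0).
def Pre_cotas_inferiores (poset : List Int) (conjunto : List Int) : Prop :=
  (0 : Int) ∈ poset → ∀ e ∈ conjunto, e ≤ 0
instance (poset : List Int) (conjunto : List Int) : Decidable (Pre_cotas_inferiores poset conjunto) := by unfold Pre_cotas_inferiores; infer_instance
def pvWitness_cotas_inferiores : List Int × List Int := ([2, 3, -1], [6, 12])

def Spec_cotas_inferiores (poset : List Int) (conjunto : List Int) (out : List Int) : Prop := out = cotas_inferiores_alt poset conjunto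
instance (poset : List Int) (conjunto : List Int) (out : List Int) : Decidable (Spec_cotas_inferiores poset conjunto out) := by unfold Spec_cotas_inferiores; infer_instance

-- ===== CLAIM (what is proved, stated in full; the proofs are below) =====
def Claim_equal_cotas_inferiores : Prop := ∀ (poset : List Int) (conjunto : List Int), Dom_cotas_inferiores poset conjunto → Pre_cotas_inferiores poset conjunto → Spec_cotas_inferiores poset conjunto (cotas_inferiores poset conjunto)

-- ===== LEMMAS AND PROOFS =====

-- A's inner loop is an `all`
theorem innerA_eq_all (n : Int) (l : List Int) (b : Bool) :
    l.foldl (fun b element =>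
      if n < element then
        (if PySem.Int.mod element n ≠ 0 then false else b)
      else false) b
    = (b && l.all (fun e => decide (n < e) && decide (PySem.Int.mod e n = 0))) := by
  induction l generalizing b with
  | nil => simp
  | cons e t ih =>
    simp only [List.foldl_cons, List.all_cons, ih]
    cases b <;> by_cases h1 : n < e <;> by_cases h2 : PySem.Int.mod e n = 0 <;>
      simp [h1, h2]

-- A's whole function is a filter
theorem A_foldl_eq (l : List Int) (poset acc : List Int) :
    poset.foldl (fun ci number =>
      let isCotaInferior := l.foldl (fun b element =>
        if number < element then
          (if PySem.Int.mod element number ≠ 0 then false else b)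
        else false) true
      if isCotaInferior then ci ++ [number] else ci) acc
    = acc ++ poset.filter (fun n => l.all (fun e => decide (n < e) && decide (PySem.Int.mod e n = 0))) := by
  have hfun : (fun (ci : List Int) (number : Int) =>
      let isCotaInferior := l.foldl (fun b element =>
        if number < element then
          (if PySem.Int.mod element number ≠ 0 then false else b)
        else false) true
      if isCotaInferior then ci ++ [number] else ci)
    = fun ci number =>
        if l.all (fun e => decide (number < e) && decide (PySem.Int.mod e number = 0))
        then ci ++ [number] else ci := by
    funext ci number
    simp only [innerA_eq_all, Bool.true_and]
  rw [hfun, PySem.List.foldl_append_if_eq_filter]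

theorem pvEuclidAux_eq_gcd (fuel a b : Nat) (h : b ≤ fuel) : pvEuclidAux fuel a b = Nat.gcd b a := by
  induction fuel generalizing a b with
  | zero =>
    interval_cases b
    simp [pvEuclidAux]
  | succ f ih =>
    cases b with
    | zero => simp [pvEuclidAux]
    | succ b =>
      have hm : a % (b + 1) ≤ f := by
        have h1 : a % (b + 1) < b + 1 := Nat.mod_lt a (by omega)
        omega
      rw [pvEuclidAux, ih (b + 1) (a % (b + 1)) hm, Nat.gcd_rec (b + 1) a]

theorem pvGcd_eq (a b : Int) : pvGcd a b = Int.gcd a b := by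
  simp [pvGcd, pvEuclidAux_eq_gcd _ _ _ (le_refl _), Int.gcd, Nat.gcd_comm]

theorem dvd_pvGcd_iff (n a b : Int) : n ∣ pvGcd a b ↔ n ∣ a ∧ n ∣ b := by
  rw [pvGcd_eq]
  constructor
  · intro h
    exact ⟨h.trans (Int.gcd_dvd_left a b), h.trans (Int.gcd_dvd_right a b)⟩
  · rintro ⟨h1, h2⟩
    exact Int.dvd_coe_gcd h1 h2

-- B's fold: first component is the running min, second the running gcd
theorem foldl_mg (l : List Int) (m0 g0 : Int) :
    l.foldl (fun (p : Int × Int) e => ((if e < p.1 then e else p.1), pvGcd p.2 e)) (m0, g0)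
    = (l.foldl (fun m e => if e < m then e else m) m0,
       l.foldl (fun g e => pvGcd g e) g0) := by
  induction l generalizing m0 g0 with
  | nil => rfl
  | cons e t ih => simp only [List.foldl_cons, ih]

theorem lt_foldl_min_iff (n : Int) (l : List Int) (m0 : Int) :
    n < l.foldl (fun m e => if e < m then e else m) m0 ↔ n < m0 ∧ ∀ e ∈ l, n < e := by
  induction l generalizing m0 with
  | nil => simp
  | cons e t ih =>
    simp only [List.foldl_cons, ih, List.mem_cons]
    constructor
    · rintro ⟨h1, h2⟩
      split_ifs at h1 with h <;>
        exact ⟨by omega, fun x hx => by rcases hx with rfl | hx; omega; exact h2 x hx⟩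
    · rintro ⟨h1, h2⟩
      refine ⟨?_, fun x hx => h2 x (Or.inr hx)⟩
      have := h2 e (Or.inl rfl); split_ifs <;> omega

theorem dvd_foldl_gcd_iff (n : Int) (l : List Int) (g0 : Int) :
    n ∣ l.foldl (fun g e => pvGcd g e) g0 ↔ n ∣ g0 ∧ ∀ e ∈ l, n ∣ e := by
  induction l generalizing g0 with
  | nil => simp
  | cons e t ih =>
    simp only [List.foldl_cons, ih, dvd_pvGcd_iff, List.mem_cons]
    constructor
    · rintro ⟨⟨h1, h2⟩, h3⟩
      exact ⟨h1, fun x hx => by rcases hx with rfl | hx; exact h2; exact h3 x hx⟩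
    · rintro ⟨h1, h2⟩
      exact ⟨⟨h1, h2 e (Or.inl rfl)⟩, fun x hx => h2 x (Or.inr hx)⟩

-- ===== VERDICT (by name: the statement is the Claim_ definition above) =====
theorem cotas_inferiores_spec : Claim_equal_cotas_inferiores := by
  intro poset conjunto _ hpre
  unfold Spec_cotas_inferiores cotas_inferiores
  rw [A_foldl_eq, List.nil_append]
  cases conjunto with
  | nil => simp [cotas_inferiores_alt]
  | cons c cs =>
    show _ = cotas_inferiores_alt poset (c :: cs)
    simp only [cotas_inferiores_alt, foldl_mg]
    apply List.filter_congr
    intro n hn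
    apply Bool.eq_iff_iff.mpr
    simp only [List.all_eq_true, Bool.and_eq_true, decide_eq_true_eq,
      lt_foldl_min_iff, ne_eq]
    constructor
    · intro h
      have hne : n ≠ 0 := by
        intro h0; subst h0
        have hc0 : c ≤ 0 := hpre hn c (List.mem_cons_self ..)
        have := (h c (List.mem_cons_self ..)).1
        omega
      have hdvd : ∀ e ∈ c :: cs, n ∣ e := fun e he =>
        (PySem.Int.mod_eq_zero_iff_dvd e n).mp (h e he).2
      refine ⟨⟨hne, (h c (List.mem_cons_self ..)).1,
        fun e he => (h e he).1⟩, ?_⟩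
      exact (PySem.Int.mod_eq_zero_iff_dvd _ n).mpr
        ((dvd_foldl_gcd_iff n (c :: cs) 0).mpr ⟨dvd_zero n, hdvd⟩)
    · rintro ⟨⟨_, _, hlt⟩, hmod⟩
      have hdvd := ((dvd_foldl_gcd_iff n (c :: cs) 0).mp
        ((PySem.Int.mod_eq_zero_iff_dvd _ n).mp hmod)).2
      intro e he
      exact ⟨hlt e he, (PySem.Int.mod_eq_zero_iff_dvd e n).mpr (hdvd e he)⟩
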